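-- pv_equiv track=rewrite | github.com/darsan-0/ASSISTIVE_VISION_PRO | voice_commands.py | _match_command
-- ===== SOURCE A (Python) =====
-- COMMAND_MAP = {
--     # Start
--     "start":        "start",
--     "activate":     "start",
--     "begin":        "start",
--     "on":           "start",
--
--     # Stop
--     "stop":         "stop",
--     "pause":        "stop",
--     "deactivate":   "stop",
--     "off":          "stop",
--     "halt":         "stop",
--
--     # Directions
--     "front":        "front",
--     "ahead":        "front",
--     "forward":      "front",
--     "what's ahead": "front",
--     "whats ahead":  "front",
--
--     "back":         "back",
--     "behind":       "back",
--     "backward":     "back",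
--
--     "left":         "left",
--     "move left":    "left",
--
--     "right":        "right",
--     "move right":   "right",
--
--     # Status
--     "status":       "status",
--     "report":       "status",
--     "scan":         "status",
--     "describe":     "status",
--     "what do you see": "status",
--     "what's around":   "status",
--
--     # Repeat
--     "repeat":       "repeat",
--     "say again":    "repeat",
--     "again":        "repeat",
--
--     # Mute
--     "mute":         "mute",
--     "silence":      "mute",
--     "quiet":        "mute",
--
--     # Unmute
--     "unmute":       "unmute",
--     "sound on":     "unmute",
--     "voice on":     "unmute",
--
--     # Help
--     "help":         "help",
--     "commands":     "help",
--     "what can you do": "help",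
--
--     # Exit
--     "exit":         "exit",
--     "quit":         "exit",
--     "close":        "exit",
-- }
--
-- def _match_command(text):
--     """Match raw text against command map. Longest match wins."""
--     best_action = None
--     best_len = 0
--     for phrase, action in COMMAND_MAP.items():
--         if phrase in text and len(phrase) > best_len:
--             best_action = action
--             best_len = len(phrase)
--     return best_action
-- ===== SOURCE B (Python) =====
-- # Compact grouped command table: for each action, its trigger phrases joined by a semicolon
-- # (groups listed in the original map's order; phrases in order within each group).
-- _GROUPS = [
--     ("start",  "start;activate;begin;on"),
--     ("stop",   "stop;pause;deactivate;off;halt"),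
--     ("front",  "front;ahead;forward;what's ahead;whats ahead"),
--     ("back",   "back;behind;backward"),
--     ("left",   "left;move left"),
--     ("right",  "right;move right"),
--     ("status", "status;report;scan;describe;what do you see;what's around"),
--     ("repeat", "repeat;say again;again"),
--     ("mute",   "mute;silence;quiet"),
--     ("unmute", "unmute;sound on;voice on"),
--     ("help",   "help;commands;what can you do"),
--     ("exit",   "exit;quit;close"),
-- ]
--
-- def _phrase_pairs():
--     return [(p, action) for action, joined in _GROUPS for p in joined.split(";")]
--
-- def _match_command(text):
--     """Longest-first scan: stable sort phrases by descending length, return first hit."""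
--     for phrase, action in sorted(_phrase_pairs(), key=lambda kv: -len(kv[0])):
--         if phrase in text:
--             return action
--     return None
-- ===== Notes on version B (the rewrite author's own statement) =====
-- stated objective: idiomatic
-- what changed: Replaces the scan-all loop tracking (best_action, best_len) over the literal 43-entry dict with a compact per-action grouped table of semicolon-joined phrase strings, flattened at runtime and scanned longest-first (stable descending-length sort) with an early return on the first matching phrase.
import Mathlib
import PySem

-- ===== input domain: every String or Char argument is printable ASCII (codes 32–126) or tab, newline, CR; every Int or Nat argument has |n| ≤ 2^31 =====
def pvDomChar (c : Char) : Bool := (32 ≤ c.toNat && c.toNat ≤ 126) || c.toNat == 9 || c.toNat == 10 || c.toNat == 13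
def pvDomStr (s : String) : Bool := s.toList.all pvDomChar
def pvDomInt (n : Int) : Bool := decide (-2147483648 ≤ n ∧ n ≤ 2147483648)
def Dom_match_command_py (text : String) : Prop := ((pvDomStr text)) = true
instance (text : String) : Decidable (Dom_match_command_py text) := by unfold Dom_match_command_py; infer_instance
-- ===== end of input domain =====

-- B replaces A's scan-all-tracking-max loop over the literal 43-entry table by a compact
-- per-action grouped table (semicolon-joined phrases, split at runtime), flattened and stably
-- sorted by descending phrase length, with an early return on the first matching phrase
-- (idiomatic decomposition; not faster).


-- ===== PORT A =====
-- COMMAND_MAP.items() — the dict has distinct keys, so its items in insertion order: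
def cmdItems : List (String × String) :=
  [("start", "start"), ("activate", "start"), ("begin", "start"), ("on", "start"),
   ("stop", "stop"), ("pause", "stop"), ("deactivate", "stop"), ("off", "stop"), ("halt", "stop"),
   ("front", "front"), ("ahead", "front"), ("forward", "front"), ("what's ahead", "front"), ("whats ahead", "front"),
   ("back", "back"), ("behind", "back"), ("backward", "back"),
   ("left", "left"), ("move left", "left"),
   ("right", "right"), ("move right", "right"),
   ("status", "status"), ("report", "status"), ("scan", "status"), ("describe", "status"),
   ("what do you see", "status"), ("what's around", "status"),
   ("repeat", "repeat"), ("say again", "repeat"), ("again", "repeat"),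
   ("mute", "mute"), ("silence", "mute"), ("quiet", "mute"),
   ("unmute", "unmute"), ("sound on", "unmute"), ("voice on", "unmute"),
   ("help", "help"), ("commands", "help"), ("what can you do", "help"),
   ("exit", "exit"), ("quit", "exit"), ("close", "exit")]

-- one iteration of A's loop: 'if phrase in text and len(phrase) > best_len: …'
def pvStepA (text : String) (st : Option String × Int) (kv : String × String) : Option String × Int :=
  if PySem.Str.isIn kv.1 text && decide (st.2 < PySem.Str.len kv.1) then (some kv.2, PySem.Str.len kv.1) else st

def match_command_py (text : String) : Option String :=
  (cmdItems.foldl (pvStepA text) (none, 0)).1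

-- ===== PORT B =====
-- Source B's _GROUPS: per-action ';'-joined phrase strings
def cmdGroups : List (String × String) :=
  [("start",  "start;activate;begin;on"),
   ("stop",   "stop;pause;deactivate;off;halt"),
   ("front",  "front;ahead;forward;what's ahead;whats ahead"),
   ("back",   "back;behind;backward"),
   ("left",   "left;move left"),
   ("right",  "right;move right"),
   ("status", "status;report;scan;describe;what do you see;what's around"),
   ("repeat", "repeat;say again;again"),
   ("mute",   "mute;silence;quiet"),
   ("unmute", "unmute;sound on;voice on"),
   ("help",   "help;commands;what can you do"),
   ("exit",   "exit;quit;close")]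

-- Source B's _phrase_pairs(): flatten the groups, splitting each joined string on ';'
def cmdPhrasePairs : List (String × String) :=
  cmdGroups.flatMap (fun g => ((PySem.Str.split? g.2 ";").getD []).map (fun p => (p, g.1)))

def match_command_py_alt (text : String) : Option String :=
  (((PySem.List.sorted cmdPhrasePairs (fun kv => -(PySem.Str.len kv.1)) false).find?
      (fun kv => PySem.Str.isIn kv.1 text)).map (·.2))

-- ===== PRECONDITION & SPEC =====
def Spec_match_command_py (text : String) (out : Option String) : Prop := out = match_command_py_alt text
instance (text : String) (out : Option String) : Decidable (Spec_match_command_py text out) := by unfold Spec_match_command_py; infer_instance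

-- ===== CLAIM (what is proved, stated in full; the proofs are below) =====
def Claim_equal_match_command_py : Prop := ∀ (text : String), Dom_match_command_py text → Spec_match_command_py text (match_command_py text)

-- ===== LEMMAS AND PROOFS =====

-- B's flattened grouped table lists exactly A's dict items, in order
lemma phrasePairs_eq_items : cmdPhrasePairs = cmdItems := by decide

-- abbreviations used only by the proofs
def pvBefore : (String × String) → (String × String) → Bool :=
  fun a b => decide ((-(PySem.Str.len a.1) : Int) < -(PySem.Str.len b.1))

def pvDesc (a b : String × String) : Prop := PySem.Str.len b.1 ≤ PySem.Str.len a.1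

-- the (best_action, best_len) pair that a descending-length list M encodes
def pvF (p : String → Bool) (M : List (String × String)) : Option String × Int :=
  (((M.find? (fun kv => p kv.1)).map (·.2)),
   ((M.find? (fun kv => p kv.1)).map (fun kv => PySem.Str.len kv.1)).getD 0)

lemma pvBefore_iff (x y : String × String) :
    pvBefore x y = true ↔ PySem.Str.len y.1 < PySem.Str.len x.1 := by
  unfold pvBefore
  rw [decide_eq_true_iff]
  omega

lemma insertBy_pairwise (x : String × String) (M : List (String × String))
    (hM : M.Pairwise pvDesc) :
    (PySem.List.insertBy pvBefore x M).Pairwise pvDesc := by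
  induction M with
  | nil => simp [PySem.List.insertBy]
  | cons y t ih =>
    rw [List.pairwise_cons] at hM
    by_cases h : pvBefore x y = true
    · have hlt : PySem.Str.len y.1 < PySem.Str.len x.1 := (pvBefore_iff x y).mp h
      simp only [PySem.List.insertBy, h, if_pos]
      refine List.Pairwise.cons ?_ (List.Pairwise.cons hM.1 hM.2)
      intro z hz
      rcases List.mem_cons.mp hz with rfl | hz
      · exact le_of_lt hlt
      · exact le_trans (hM.1 z hz) (le_of_lt hlt)
    · simp only [PySem.List.insertBy, h, Bool.false_eq_true, if_neg, not_false_iff]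
      refine List.Pairwise.cons ?_ (ih hM.2)
      intro z hz
      rcases (PySem.List.mem_insertBy pvBefore x z t).mp hz with hzx | hz
      · have hnot : ¬ PySem.Str.len y.1 < PySem.Str.len x.1 := fun hc => h ((pvBefore_iff x y).mpr hc)
        unfold pvDesc
        rw [hzx]
        omega
      · exact hM.1 z hz

-- the first match of a descending list is no longer than the head
lemma pvF_snd_le (p : String → Bool) (y : String × String) (t : List (String × String))
    (hM : (y :: t).Pairwise pvDesc) :
    (pvF p (y :: t)).2 ≤ max 0 (PySem.Str.len y.1) := by
  rw [List.pairwise_cons] at hM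
  by_cases hpy : p y.1 = true
  · simp only [pvF, List.find?_cons, hpy, Option.map_some, Option.getD_some]
    omega
  · have e : pvF p (y :: t) = pvF p t := by simp [pvF, hpy]
    rw [e]
    rcases hfind : t.find? (fun kv => p kv.1) with _ | w
    · simp [pvF, hfind]
    · have hw : w ∈ t := List.mem_of_find?_eq_some hfind
      have := hM.1 w hw; unfold pvDesc at this
      simp only [pvF, hfind, Option.map_some, Option.getD_some]
      omega

lemma pvF_cons_pos (p : String → Bool) (x : String × String) (M : List (String × String))
    (hp : p x.1 = true) : pvF p (x :: M) = (some x.2, PySem.Str.len x.1) := by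
  simp [pvF, hp]

lemma pvF_cons_neg (p : String → Bool) (x : String × String) (M : List (String × String))
    (hp : ¬ p x.1 = true) : pvF p (x :: M) = pvF p M := by
  simp [pvF, hp]

-- key step: inserting x into a descending list transforms pvF exactly as A's loop body does
lemma pvF_insertBy (p : String → Bool) (x : String × String) (M : List (String × String))
    (hM : M.Pairwise pvDesc) (hx : 0 < PySem.Str.len x.1) :
    pvF p (PySem.List.insertBy pvBefore x M) =
      (if p x.1 && decide ((pvF p M).2 < PySem.Str.len x.1) then (some x.2, PySem.Str.len x.1)
       else pvF p M) := by
  induction M with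
  | nil =>
    have e : PySem.List.insertBy pvBefore x [] = [x] := rfl
    have hc : (p x.1 && decide ((pvF p ([] : List (String × String))).2 < PySem.Str.len x.1)) = p x.1 := by
      rw [show (pvF p ([] : List (String × String))).2 = 0 from rfl, decide_eq_true hx, Bool.and_true]
    rw [e, hc]
    by_cases hp : p x.1 = true
    · rw [hp, if_pos rfl, pvF_cons_pos p x [] hp]
    · rw [pvF_cons_neg p x [] hp]
      simp [hp, pvF]
  | cons y t ih =>
    rw [List.pairwise_cons] at hM
    by_cases h : pvBefore x y = true
    · -- x goes in front; every match of y :: t is shorter than x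
      have hlt : PySem.Str.len y.1 < PySem.Str.len x.1 := (pvBefore_iff x y).mp h
      have e : PySem.List.insertBy pvBefore x (y :: t) = x :: y :: t := by
        simp [PySem.List.insertBy, h]
      rw [e]
      by_cases hp : p x.1 = true
      · have hbound := pvF_snd_le p y t (List.pairwise_cons.mpr hM)
        have hcond : (pvF p (y :: t)).2 < PySem.Str.len x.1 := by omega
        have hc : (p x.1 && decide ((pvF p (y :: t)).2 < PySem.Str.len x.1)) = true := by
          rw [hp, decide_eq_true hcond, Bool.and_true]
        rw [hc, if_pos rfl, pvF_cons_pos p x (y :: t) hp]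
      · have hc : (p x.1 && decide ((pvF p (y :: t)).2 < PySem.Str.len x.1)) = false := by
          rw [Bool.eq_false_iff.mpr hp, Bool.false_and]
        rw [hc, pvF_cons_neg p x (y :: t) hp]
        simp
    · -- x goes after y
      have e : PySem.List.insertBy pvBefore x (y :: t) = y :: PySem.List.insertBy pvBefore x t := by
        simp [PySem.List.insertBy, h]
      rw [e]
      by_cases hpy : p y.1 = true
      · -- y is already the first (and longest) match; nothing changes
        have hxy : PySem.Str.len x.1 ≤ PySem.Str.len y.1 := by
          have : ¬ PySem.Str.len y.1 < PySem.Str.len x.1 := fun hc => h ((pvBefore_iff x y).mpr hc)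
          omega
        have hsnd : (pvF p (y :: t)).2 = PySem.Str.len y.1 := by
          rw [pvF_cons_pos p y t hpy]
        have hc : (p x.1 && decide ((pvF p (y :: t)).2 < PySem.Str.len x.1)) = false := by
          rw [hsnd, decide_eq_false (by omega : ¬ PySem.Str.len y.1 < PySem.Str.len x.1), Bool.and_false]
        rw [hc, pvF_cons_pos p y _ hpy, pvF_cons_pos p y t hpy]
        simp
      · have e1 := pvF_cons_neg p y (PySem.List.insertBy pvBefore x t) hpy
        have e2 := pvF_cons_neg p y t hpy
        rw [e1, e2, ih hM.2]

-- A's whole fold equals pvF of the insertion-sorted list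
lemma foldA_eq_pvF (text : String) (L : List (String × String))
    (hpos : ∀ kv ∈ L, 0 < PySem.Str.len kv.1) :
    L.foldl (pvStepA text) (none, 0) =
      pvF (fun s => PySem.Str.isIn s text)
        (L.foldl (fun acc x => PySem.List.insertBy pvBefore x acc) []) ∧
    (L.foldl (fun acc x => PySem.List.insertBy pvBefore x acc) []).Pairwise pvDesc := by
  induction L using List.reverseRecOn with
  | nil => exact ⟨by simp [pvF], List.Pairwise.nil⟩
  | append_singleton L x ih =>
    have hpos' : ∀ kv ∈ L, 0 < PySem.Str.len kv.1 := fun kv hkv => hpos kv (by simp [hkv])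
    have hx : 0 < PySem.Str.len x.1 := hpos x (by simp)
    obtain ⟨hfold, hpair⟩ := ih hpos'
    rw [List.foldl_append, List.foldl_append]
    simp only [List.foldl_cons, List.foldl_nil]
    constructor
    · rw [hfold, pvF_insertBy _ x _ hpair hx]
      unfold pvStepA pvF
      rfl
    · exact insertBy_pairwise x _ hpair

lemma sorted_is_foldl :
    PySem.List.sorted cmdPhrasePairs (fun kv => -(PySem.Str.len kv.1)) false =
      cmdItems.foldl (fun acc x => PySem.List.insertBy pvBefore x acc) [] := by
  rw [PySem.List.sorted_eq_foldl_insertBy, phrasePairs_eq_items]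
  rfl

lemma cmdItems_pos : ∀ kv ∈ cmdItems, 0 < PySem.Str.len kv.1 := by decide

-- ===== VERDICT (by name: the statement is the Claim_ definition above) =====
theorem match_command_py_spec : Claim_equal_match_command_py := by
  intro text _
  unfold Spec_match_command_py match_command_py match_command_py_alt
  rw [sorted_is_foldl, (foldA_eq_pvF text cmdItems cmdItems_pos).1]
  rfl
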